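-- pv_equiv track=rewrite | github.com/unknownboyy/GUVI | pro35.py | left
-- ===== SOURCE A (Python) =====
-- def left(avg):
--     moves = 0
--     i = 0
--     j = len(avg)-1
--     while i<j:
--         while i<len(avg) and avg[i]==1:
--             i+=1
--         while j>=0 and avg[j]==0:
--             j-=1
--         if i<j:
--             moves+=(j-i)
--             i+=1;j-=1
--         else:
--             break
--     return moves
-- ===== SOURCE B (Python) =====
-- def left(avg):
--     zeros = [k for k, x in enumerate(avg) if x != 1]
--     ones = [k for k, x in enumerate(avg) if x != 0]
--     moves = 0
--     for z, o in zip(zeros, reversed(ones)):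
--         if z >= o:
--             break
--         moves += o - z
--     return moves
-- ===== Notes on version B (the rewrite author's own statement) =====
-- stated objective: alternative
-- what changed: Replaces A's nested while-loops with interleaved pointer skipping by a single enumerate pass that builds the lists of non-one and non-zero indices, then one outside-in pass pairing the smallest remaining non-one index with the largest remaining non-zero index.
import Mathlib
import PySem

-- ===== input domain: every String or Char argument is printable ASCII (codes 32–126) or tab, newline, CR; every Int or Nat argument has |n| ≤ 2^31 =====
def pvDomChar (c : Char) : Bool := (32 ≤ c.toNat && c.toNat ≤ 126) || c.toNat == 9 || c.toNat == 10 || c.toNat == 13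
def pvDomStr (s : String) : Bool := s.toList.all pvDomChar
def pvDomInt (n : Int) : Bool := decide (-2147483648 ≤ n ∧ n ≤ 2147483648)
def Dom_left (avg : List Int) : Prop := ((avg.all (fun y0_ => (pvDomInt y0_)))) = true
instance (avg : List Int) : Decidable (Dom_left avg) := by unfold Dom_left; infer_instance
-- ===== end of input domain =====

-- B replaces A's interleaved two-pointer skip loops by an index-table build plus one outside-in pairing pass (alternative decomposition, same exact result).

-- ===== PORT A =====
-- inner loop `while i<len(avg) and avg[i]==1: i+=1`
def skipOnes (avg : List Int) (i : Int) : Int :=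
  if i < (avg.length : Int) ∧ (PySem.List.pyGet? avg i).getD 0 == 1 then skipOnes avg (i + 1) else i
termination_by (avg.length - i).toNat
decreasing_by omega

-- inner loop `while j>=0 and avg[j]==0: j-=1`
def skipZeros (avg : List Int) (j : Int) : Int :=
  if 0 ≤ j ∧ (PySem.List.pyGet? avg j).getD 1 == 0 then skipZeros avg (j - 1) else j
termination_by (j + 1).toNat
decreasing_by omega

-- bounds used by leftLoop's termination
theorem le_skipOnes (avg : List Int) (i : Int) : i ≤ skipOnes avg i := by
  fun_induction skipOnes avg i with
  | case1 i h ih => omega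
  | case2 i h => omega

theorem skipZeros_le (avg : List Int) (j : Int) : skipZeros avg j ≤ j := by
  fun_induction skipZeros avg j with
  | case1 j h ih => omega
  | case2 j h => omega

-- outer loop `while i<j: …`
def leftLoop (avg : List Int) (moves i j : Int) : Int :=
  if i < j then
    if skipOnes avg i < skipZeros avg j then
      leftLoop avg (moves + (skipZeros avg j - skipOnes avg i)) (skipOnes avg i + 1) (skipZeros avg j - 1)
    else moves
  else moves
termination_by (j - i).toNat
decreasing_by
  have h1 := le_skipOnes avg i
  have h2 := skipZeros_le avg j
  omega

def left (avg : List Int) : Int := leftLoop avg 0 0 ((avg.length : Int) - 1)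

-- ===== PORT B =====
-- `zeros = [k for k, x in enumerate(avg) if x != 1]`
def baseZeros (avg : List Int) : List Int :=
  ((PySem.List.enumerate avg 0).filter (fun p => p.2 ≠ 1)).map Prod.fst

-- `ones = [k for k, x in enumerate(avg) if x != 0]`
def baseOnes (avg : List Int) : List Int :=
  ((PySem.List.enumerate avg 0).filter (fun p => p.2 ≠ 0)).map Prod.fst

-- `for z, o in zip(zeros, reversed(ones)): if z >= o: break; moves += o - z`
def pairLoop (moves : Int) : List (Int × Int) → Int
  | [] => moves
  | (z, o) :: rest => if z ≥ o then moves else pairLoop (moves + (o - z)) rest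

def left_alt (avg : List Int) : Int :=
  pairLoop 0 ((baseZeros avg).zip (baseOnes avg).reverse)

-- ===== PRECONDITION & SPEC =====
def Spec_left (avg : List Int) (out : Int) : Prop := out = left_alt avg
instance (avg : List Int) (out : Int) : Decidable (Spec_left avg out) := by unfold Spec_left; infer_instance

-- ===== CLAIM (what is proved, stated in full; the proofs are below) =====
def Claim_equal_left : Prop := ∀ (avg : List Int), Dom_left avg → Spec_left avg (left avg)

-- ===== LEMMAS AND PROOFS =====

-- membership characterisations of the index tables
theorem mem_baseZeros (avg : List Int) (z : Int) :
    z ∈ baseZeros avg ↔ 0 ≤ z ∧ z < (avg.length : Int) ∧ avg.getD z.toNat 0 ≠ 1 := by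
  unfold baseZeros
  rw [List.mem_map]
  constructor
  · rintro ⟨p, hp, rfl⟩
    rw [List.mem_filter] at hp
    obtain ⟨hpe, h1⟩ := hp
    rw [PySem.List.mem_enumerate_iff] at hpe
    obtain ⟨k, hk, rfl⟩ := hpe
    refine ⟨by simp, by simp; omega, ?_⟩
    simp only [zero_add]
    rw [List.getD_eq_getElem?_getD]
    simp only [Int.toNat_natCast]
    rw [List.getElem?_eq_getElem hk]
    simpa using h1
  · rintro ⟨h0, hl, hne⟩
    have hk : z.toNat < avg.length := by omega
    refine ⟨((z.toNat : Int), avg[z.toNat]), ?_, by simp; omega⟩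
    rw [List.mem_filter, PySem.List.mem_enumerate_iff]
    refine ⟨⟨z.toNat, hk, by simp⟩, ?_⟩
    rw [List.getD_eq_getElem?_getD, List.getElem?_eq_getElem hk] at hne
    simpa using hne

theorem mem_baseOnes (avg : List Int) (o : Int) :
    o ∈ baseOnes avg ↔ 0 ≤ o ∧ o < (avg.length : Int) ∧ avg.getD o.toNat 0 ≠ 0 := by
  unfold baseOnes
  rw [List.mem_map]
  constructor
  · rintro ⟨p, hp, rfl⟩
    rw [List.mem_filter] at hp
    obtain ⟨hpe, h1⟩ := hp
    rw [PySem.List.mem_enumerate_iff] at hpe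
    obtain ⟨k, hk, rfl⟩ := hpe
    refine ⟨by simp, by simp; omega, ?_⟩
    simp only [zero_add]
    rw [List.getD_eq_getElem?_getD]
    simp only [Int.toNat_natCast]
    rw [List.getElem?_eq_getElem hk]
    simpa using h1
  · rintro ⟨h0, hl, hne⟩
    have hk : o.toNat < avg.length := by omega
    refine ⟨((o.toNat : Int), avg[o.toNat]), ?_, by simp; omega⟩
    rw [List.mem_filter, PySem.List.mem_enumerate_iff]
    refine ⟨⟨o.toNat, hk, by simp⟩, ?_⟩
    rw [List.getD_eq_getElem?_getD, List.getElem?_eq_getElem hk] at hne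
    simpa using hne

theorem pairwise_baseZeros (avg : List Int) : (baseZeros avg).Pairwise (· < ·) := by
  refine List.Pairwise.map _ (fun a b h => h) ?_
  exact (PySem.List.pairwise_lt_enumerate avg 0).filter _

theorem pairwise_baseOnes (avg : List Int) : (baseOnes avg).Pairwise (· < ·) := by
  refine List.Pairwise.map _ (fun a b h => h) ?_
  exact (PySem.List.pairwise_lt_enumerate avg 0).filter _

-- what the skip loops guarantee
theorem skipOnes_one_of_lt (avg : List Int) (i : Int) :
    ∀ z : Int, 0 ≤ z → i ≤ z → z < skipOnes avg i → avg.getD z.toNat 0 = 1 := by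
  fun_induction skipOnes avg i with
  | case1 i h ih =>
    intro z h0 hiz hlt
    by_cases hzi : z = i
    · subst hzi
      have h2 := h.2
      have hlen : z.toNat < avg.length := by omega
      rw [show z = ((z.toNat : Nat) : Int) from by omega, PySem.List.pyGet?_natCast,
        List.getElem?_eq_getElem hlen] at h2
      rw [List.getD_eq_getElem?_getD, List.getElem?_eq_getElem hlen]
      simpa using h2
    · exact ih z h0 (by omega) hlt
  | case2 i h => intro z _ hiz hlt; omega

theorem skipOnes_stop_getD (avg : List Int) (i : Int) :
    0 ≤ i → skipOnes avg i < (avg.length : Int) → avg.getD (skipOnes avg i).toNat 0 ≠ 1 := by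
  fun_induction skipOnes avg i with
  | case1 i h ih => intro h0 hl; exact ih (by omega) hl
  | case2 i h =>
    intro h0 hl heq
    apply h
    refine ⟨hl, ?_⟩
    have hlen : i.toNat < avg.length := by omega
    rw [List.getD_eq_getElem?_getD, List.getElem?_eq_getElem hlen] at heq
    rw [show i = ((i.toNat : Nat) : Int) from by omega, PySem.List.pyGet?_natCast,
      List.getElem?_eq_getElem hlen]
    simpa using heq

theorem skipZeros_zero_of_lt (avg : List Int) (j : Int) :
    ∀ z : Int, 0 ≤ z → skipZeros avg j < z → z ≤ j → avg.getD z.toNat 0 = 0 := by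
  fun_induction skipZeros avg j with
  | case1 j h ih =>
    intro z h0 h1 h2
    by_cases hzj : z = j
    · subst hzj
      have h2' := h.2
      rw [show z = ((z.toNat : Nat) : Int) from by omega, PySem.List.pyGet?_natCast] at h2'
      rcases hg : avg[z.toNat]? with _ | v
      · rw [hg] at h2'; simp at h2'
      · rw [hg] at h2'
        rw [List.getD_eq_getElem?_getD, hg]
        simpa using h2'
    · exact ih z h0 h1 (by omega)
  | case2 j h => intro z _ h1 h2; omega

theorem skipZeros_stop_getD (avg : List Int) (j : Int) :
    0 ≤ skipZeros avg j → skipZeros avg j < (avg.length : Int) → avg.getD (skipZeros avg j).toNat 0 ≠ 0 := by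
  fun_induction skipZeros avg j with
  | case1 j h ih => intro h0 hl; exact ih h0 hl
  | case2 j h =>
    intro h0 hl heq
    apply h
    refine ⟨h0, ?_⟩
    have hlen : j.toNat < avg.length := by omega
    rw [List.getD_eq_getElem?_getD, List.getElem?_eq_getElem hlen] at heq
    rw [show j = ((j.toNat : Nat) : Int) from by omega, PySem.List.pyGet?_natCast,
      List.getElem?_eq_getElem hlen]
    simpa using heq

-- the halves of the index tables that the pointers still have to visit
def zerosGe (avg : List Int) (i : Int) : List Int :=
  (baseZeros avg).filter (fun z => i ≤ z)

def onesLe (avg : List Int) (j : Int) : List Int :=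
  (baseOnes avg).filter (fun o => o ≤ j)

-- peeling the minimum off a left-bounded filter of a sorted list
theorem filter_ge_cons (l : List Int) {a x : Int} (hs : l.Pairwise (· < ·)) (hx : x ∈ l)
    (hax : a ≤ x) (hmin : ∀ y ∈ l, a ≤ y → x ≤ y) :
    l.filter (fun y => a ≤ y) = x :: l.filter (fun y => x + 1 ≤ y) := by
  induction l with
  | nil => cases hx
  | cons y t ih =>
    rw [List.pairwise_cons] at hs
    rcases List.mem_cons.mp hx with rfl | hxt
    · simp only [List.filter_cons]
      rw [if_pos (by simpa using hax), if_neg (by simp)]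
      congr 1
      apply List.filter_congr
      intro z hz
      have := hs.1 z hz
      simp only [decide_eq_decide]
      omega
    · have hyx : y < x := hs.1 x hxt
      have h1 : ¬ a ≤ y := fun hay =>
        absurd (hmin y (List.mem_cons_self) hay) (by omega)
      simp only [List.filter_cons]
      rw [if_neg (by simpa using h1), if_neg (by simp; omega)]
      exact ih hs.2 hxt (fun z hz haz => hmin z (List.mem_cons_of_mem _ hz) haz)

-- peeling the maximum off a right-bounded filter of a sorted list
theorem filter_le_append (l : List Int) {b x : Int} (hs : l.Pairwise (· < ·)) (hx : x ∈ l)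
    (hxb : x ≤ b) (hmax : ∀ y ∈ l, y ≤ b → y ≤ x) :
    l.filter (fun y => y ≤ b) = l.filter (fun y => y ≤ x - 1) ++ [x] := by
  induction l with
  | nil => cases hx
  | cons y t ih =>
    rw [List.pairwise_cons] at hs
    rcases List.mem_cons.mp hx with rfl | hxt
    · simp only [List.filter_cons]
      rw [if_pos (by simpa using hxb), if_neg (by simp)]
      have hp : t.filter (fun y => decide (y ≤ b)) = [] :=
        List.filter_eq_nil_iff.mpr (fun z hz => by
          have h1 := hs.1 z hz
          have h2 := hmax z (List.mem_cons_of_mem _ hz)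
          simp only [decide_eq_true_eq]
          omega)
      have hq : t.filter (fun y => decide (y ≤ x - 1)) = [] :=
        List.filter_eq_nil_iff.mpr (fun z hz => by
          have h1 := hs.1 z hz
          simp only [decide_eq_true_eq]
          omega)
      rw [hp, hq]
      rfl
    · have hyx : y < x := hs.1 x hxt
      simp only [List.filter_cons]
      rw [if_pos (by simp; omega), if_pos (by simp; omega)]
      rw [ih hs.2 hxt (fun z hz hzb => hmax z (List.mem_cons_of_mem _ hz) hzb)]
      rfl

theorem pairLoop_cons (moves z o : Int) (rest : List (Int × Int)) :
    pairLoop moves ((z, o) :: rest) = if o ≤ z then moves else pairLoop (moves + (o - z)) rest := by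
  simp [pairLoop, ge_iff_le]

theorem pairLoop_ge (moves : Int) (l1 l2 : List Int)
    (h : ∀ z o, z ∈ l1 → o ∈ l2 → o ≤ z) : pairLoop moves (l1.zip l2) = moves := by
  cases l1 with
  | nil => rfl
  | cons z t1 =>
    cases l2 with
    | nil => rfl
    | cons o t2 =>
      rw [List.zip_cons_cons, pairLoop_cons,
        if_pos (h z o (List.mem_cons_self) (List.mem_cons_self))]

theorem main_lemma (avg : List Int) (moves i j : Int) :
    0 ≤ i → j < (avg.length : Int) →
    leftLoop avg moves i j = pairLoop moves ((zerosGe avg i).zip (onesLe avg j).reverse) := by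
  fun_induction leftLoop avg moves i j with
  | case1 moves i j hij hlt ih =>
    intro hi hj
    have hi0 := le_skipOnes avg i
    have hj0 := skipZeros_le avg j
    have hi'len : skipOnes avg i < (avg.length : Int) := by omega
    have hj'0 : 0 ≤ skipZeros avg j := by omega
    have hminZ : ∀ y ∈ baseZeros avg, i ≤ y → skipOnes avg i ≤ y := by
      intro y hy hiy
      obtain ⟨h0, hl, hne⟩ := (mem_baseZeros avg y).mp hy
      by_contra hlt2
      exact hne (skipOnes_one_of_lt avg i y h0 hiy (by omega))
    have hmaxO : ∀ y ∈ baseOnes avg, y ≤ j → y ≤ skipZeros avg j := by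
      intro y hy hyj
      obtain ⟨h0, hl, hne⟩ := (mem_baseOnes avg y).mp hy
      by_contra hlt2
      exact hne (skipZeros_zero_of_lt avg j y h0 (by omega) hyj)
    have hxZ : skipOnes avg i ∈ baseZeros avg := by
      rw [mem_baseZeros]
      exact ⟨by omega, hi'len, skipOnes_stop_getD avg i hi hi'len⟩
    have hxO : skipZeros avg j ∈ baseOnes avg := by
      rw [mem_baseOnes]
      exact ⟨hj'0, by omega, skipZeros_stop_getD avg j hj'0 (by omega)⟩
    have hzeq : zerosGe avg i = skipOnes avg i :: zerosGe avg (skipOnes avg i + 1) := by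
      unfold zerosGe
      exact filter_ge_cons (baseZeros avg) (pairwise_baseZeros avg) hxZ (by omega) hminZ
    have hoeq : onesLe avg j = onesLe avg (skipZeros avg j - 1) ++ [skipZeros avg j] := by
      unfold onesLe
      exact filter_le_append (baseOnes avg) (pairwise_baseOnes avg) hxO (by omega) hmaxO
    rw [ih (by omega) (by omega), hzeq, hoeq]
    simp only [List.reverse_append, List.reverse_cons, List.reverse_nil, List.nil_append,
      List.singleton_append, List.zip_cons_cons]
    rw [pairLoop_cons, if_neg (by omega)]
  | case2 moves i j hij hge =>
    intro hi hj
    have hi0 := le_skipOnes avg i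
    have hj0 := skipZeros_le avg j
    rw [pairLoop_ge]
    intro z o hz ho
    rw [List.mem_reverse] at ho
    have hzb : z ∈ baseZeros avg := List.mem_of_mem_filter hz
    have hob : o ∈ baseOnes avg := List.mem_of_mem_filter ho
    have hiz : i ≤ z := by
      have := (List.mem_filter.mp hz).2
      simpa using this
    have hoj : o ≤ j := by
      have := (List.mem_filter.mp ho).2
      simpa using this
    obtain ⟨hz0, hzl, hzne⟩ := (mem_baseZeros avg z).mp hzb
    obtain ⟨ho0, hol, hone⟩ := (mem_baseOnes avg o).mp hob
    have h1 : skipOnes avg i ≤ z := by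
      by_contra hlt2
      exact hzne (skipOnes_one_of_lt avg i z hz0 hiz (by omega))
    have h2 : o ≤ skipZeros avg j := by
      by_contra hlt2
      exact hone (skipZeros_zero_of_lt avg j o ho0 (by omega) hoj)
    omega
  | case3 moves i j hij =>
    intro hi hj
    rw [pairLoop_ge]
    intro z o hz ho
    rw [List.mem_reverse] at ho
    have hiz : i ≤ z := by
      have := (List.mem_filter.mp hz).2
      simpa using this
    have hoj : o ≤ j := by
      have := (List.mem_filter.mp ho).2
      simpa using this
    omega

-- ===== VERDICT (by name: the statement is the Claim_ definition above) =====
theorem left_spec : Claim_equal_left := by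
  unfold Claim_equal_left
  intro avg _
  unfold Spec_left left left_alt
  rw [main_lemma avg 0 0 ((avg.length : Int) - 1) (le_refl 0) (by omega)]
  have h1 : zerosGe avg 0 = baseZeros avg := by
    unfold zerosGe
    apply List.filter_eq_self.mpr
    intro z hz
    obtain ⟨h0, _, _⟩ := (mem_baseZeros avg z).mp hz
    simpa using h0
  have h2 : onesLe avg ((avg.length : Int) - 1) = baseOnes avg := by
    unfold onesLe
    apply List.filter_eq_self.mpr
    intro o ho
    obtain ⟨_, hl, _⟩ := (mem_baseOnes avg o).mp ho
    simp
    omega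
  rw [h1, h2]
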